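-- pv_equiv track=rewrite | github.com/victorx64/biohack-debunker | services/transcription-service/src/transcription_service/youtube_client.py | _pick_format
-- ===== SOURCE A (Python) =====
-- from typing import Dict, List
--
-- def _pick_format(entries: List[Dict]) -> Dict | None:
--     if not entries:
--         return None
--     preferred_exts = ["vtt", "srt", "ttml", "srv3", "json3"]
--     for ext in preferred_exts:
--         for entry in entries:
--             if entry.get("ext") == ext:
--                 return entry
--     return entries[0]
-- ===== SOURCE B (Python) =====
-- def _pick_format(entries):
--     preferred_exts = ["vtt", "srt", "ttml", "srv3", "json3"]
--
--     def rank(entry):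
--         ext = entry.get("ext")
--         return preferred_exts.index(ext) if ext in preferred_exts else len(preferred_exts)
--
--     best = None
--     best_rank = len(preferred_exts) + 1
--     for entry in entries:
--         r = rank(entry)
--         if r < best_rank:
--             best, best_rank = entry, r
--     return best
-- ===== Notes on version B (the rewrite author's own statement) =====
-- stated objective: alternative
-- what changed: Replaces A's priority-ordered rescans of entries (one scan per preferred ext, then an entries[0] fallback) with a single pass keeping the first entry of minimal preference rank (rank = index in the preferred list, 5 for unknown), which subsumes the fallback.
import Mathlib
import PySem

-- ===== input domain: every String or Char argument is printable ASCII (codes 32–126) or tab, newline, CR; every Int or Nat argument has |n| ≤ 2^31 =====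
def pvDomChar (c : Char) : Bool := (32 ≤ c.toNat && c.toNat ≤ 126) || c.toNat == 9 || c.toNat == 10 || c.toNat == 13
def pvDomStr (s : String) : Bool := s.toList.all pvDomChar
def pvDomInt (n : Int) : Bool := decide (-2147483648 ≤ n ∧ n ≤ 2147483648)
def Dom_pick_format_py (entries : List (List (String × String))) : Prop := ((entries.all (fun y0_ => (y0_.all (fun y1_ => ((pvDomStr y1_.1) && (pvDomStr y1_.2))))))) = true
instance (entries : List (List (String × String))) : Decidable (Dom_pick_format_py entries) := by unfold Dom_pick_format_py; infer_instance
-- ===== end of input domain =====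

-- B replaces A's priority-ordered rescans (one scan of entries per preferred ext, plus an
-- entries[0] fallback) with a single pass over entries keeping the first entry of minimal
-- preference rank; same return value everywhere.

-- ===== PORT A =====
-- entry.get("ext") on a dict-entry (association list)
def pvGetExt (e : List (String × String)) : Option String := (PySem.Dict.mk e).get? "ext"

def pvPreferred : List String := ["vtt", "srt", "ttml", "srv3", "json3"]

-- literal port of A: early-out nested loops = findSome? over preferred exts of find? over entries
def pick_format_py (entries : List (List (String × String))) : Option (List (String × String)) :=
  if entries = [] then none
  else
    match (pvPreferred.findSome?
            (fun ext => entries.find? (fun e => pvGetExt e == some ext))) with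
    | some e => some e
    | none => PySem.List.pyGet? entries 0

-- ===== PORT B =====
-- rank(entry): index of entry.get("ext") in preferred_exts, or 5 when absent (None included)
def pvRank (e : List (String × String)) : Nat :=
  match pvGetExt e with
  | some s => (PySem.List.index? pvPreferred s).getD pvPreferred.length
  | none => pvPreferred.length

-- literal port of B: one fold keeping (best, best_rank), strictly-smaller rank wins
def pick_format_py_alt (entries : List (List (String × String))) : Option (List (String × String)) :=
  (entries.foldl
    (fun st e => let r := pvRank e; if r < st.2 then (some e, r) else st)
    ((none : Option (List (String × String))), pvPreferred.length + 1)).1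

-- ===== PRECONDITION & SPEC =====
def Spec_pick_format_py (entries : List (List (String × String))) (out : Option (List (String × String))) : Prop := out = pick_format_py_alt entries
instance (entries : List (List (String × String))) (out : Option (List (String × String))) : Decidable (Spec_pick_format_py entries out) := by unfold Spec_pick_format_py; infer_instance

-- ===== CLAIM (what is proved, stated in full; the proofs are below) =====
def Claim_equal_pick_format_py : Prop := ∀ (entries : List (List (String × String))), Dom_pick_format_py entries → Spec_pick_format_py entries (pick_format_py entries)

-- ===== LEMMAS AND PROOFS =====

-- proof-side rank, parametric in the preference list (rk pvPreferred = pvRank)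
def rk (exts : List String) (e : List (String × String)) : Nat :=
  match pvGetExt e with
  | some s => (exts.idxOf? s).getD exts.length
  | none => exts.length

-- minimal rank among entries, capped by the initial value c
def mnC (exts : List String) (c : Nat) (entries : List (List (String × String))) : Nat :=
  entries.foldr (fun e m => min (rk exts e) m) c

theorem rk_eq_pvRank (e : List (String × String)) : rk pvPreferred e = pvRank e := by
  unfold rk pvRank
  cases pvGetExt e <;> simp

theorem rk_cons (x : String) (xs : List String) (e : List (String × String)) :
    rk (x :: xs) e = if pvGetExt e == some x then 0 else rk xs e + 1 := by
  unfold rk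
  cases h : pvGetExt e with
  | none => simp
  | some s =>
    by_cases hs : s = x
    · subst hs; simp [List.idxOf?_cons]
    · simp only [List.idxOf?_cons, beq_iff_eq]
      rw [if_neg (Ne.symm hs), if_neg (show ¬ (some s = some x) by simp [hs])]
      cases List.idxOf? s xs <;> simp

theorem rk_le (exts : List String) (e : List (String × String)) :
    rk exts e ≤ exts.length := by
  unfold rk
  cases h : pvGetExt e with
  | none => simp
  | some s =>
    show (List.idxOf? s exts).getD exts.length ≤ exts.length
    cases hi : List.idxOf? s exts with
    | none => simp
    | some k =>
      have := PySem.List.getElem_of_index?_eq_some (xs := exts) (v := s) (k := k)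
        (by rw [PySem.List.index?_eq_idxOf?]; exact hi)
      obtain ⟨hk, _, _⟩ := this
      simpa using Nat.le_of_lt hk

theorem mnC_le_init (exts : List String) (c : Nat) (entries : List (List (String × String))) :
    mnC exts c entries ≤ c := by
  induction entries with
  | nil => simp [mnC]
  | cons e es ih => simp only [mnC, List.foldr_cons] at *; omega

theorem mnC_le_of_mem (exts : List String) (c : Nat) {e : List (String × String)}
    {entries : List (List (String × String))} (h : e ∈ entries) :
    mnC exts c entries ≤ rk exts e := by
  induction entries with
  | nil => cases h
  | cons a es ih =>
    simp only [mnC, List.foldr_cons]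
    rcases List.mem_cons.mp h with h | h
    · subst h; omega
    · have := ih h; simp only [mnC] at this; omega

theorem mnC_init_min (exts : List String) (a c : Nat) (entries : List (List (String × String))) :
    mnC exts (min a c) entries = min a (mnC exts c entries) := by
  induction entries with
  | nil => simp [mnC]
  | cons e es ih =>
    simp only [mnC, List.foldr_cons] at *
    omega

theorem mnC_attained (exts : List String) (c : Nat) (entries : List (List (String × String)))
    (h : mnC exts c entries < c) :
    ∃ a ∈ entries, rk exts a = mnC exts c entries := by
  induction entries with
  | nil => exact absurd h (by simp [mnC])
  | cons e es ih =>
    have hcons : mnC exts c (e :: es) = min (rk exts e) (mnC exts c es) := by simp [mnC]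
    by_cases he : rk exts e ≤ mnC exts c es
    · exact ⟨e, List.mem_cons_self .., by omega⟩
    · have hm : mnC exts c (e :: es) = mnC exts c es := by omega
      rw [hm]
      obtain ⟨b, hb, hrb⟩ := ih (by rw [hm] at h; exact h)
      exact ⟨b, List.mem_cons_of_mem _ hb, hrb⟩

theorem find?_congr_mem {α : Type} {p q : α → Bool} {l : List α}
    (h : ∀ a ∈ l, p a = q a) : l.find? p = l.find? q := by
  induction l with
  | nil => rfl
  | cons a l ih =>
    have ha := h a (List.mem_cons_self ..)
    simp only [List.find?_cons, ha]
    cases q a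
    · exact ih (fun b hb => h b (List.mem_cons_of_mem _ hb))
    · rfl

-- A's nested loops characterized: the first entry of minimal rank, when some ext is preferred
theorem Fchar (exts : List String) (entries : List (List (String × String))) :
    exts.findSome? (fun x => entries.find? (fun e => pvGetExt e == some x)) =
      if mnC exts exts.length entries < exts.length then
        entries.find? (fun e => rk exts e == mnC exts exts.length entries)
      else none := by
  induction exts with
  | nil =>
    have : mnC [] 0 entries ≥ 0 := Nat.zero_le _
    simp [List.findSome?_nil]
  | cons x xs ih =>
    rw [List.findSome?_cons]
    cases hf : entries.find? (fun e => pvGetExt e == some x) with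
    | some b =>
      have hb : b ∈ entries := List.mem_of_find?_eq_some hf
      have hpb : (pvGetExt b == some x) = true :=
        List.find?_some (p := fun e => pvGetExt e == some x) hf
      have hrkb : rk (x :: xs) b = 0 := by simp [rk_cons, hpb]
      have hmn : mnC (x :: xs) (x :: xs).length entries = 0 := by
        have := mnC_le_of_mem (x :: xs) (x :: xs).length hb
        omega
      rw [hmn]
      have hcond : (0 : Nat) < (x :: xs).length := by simp
      rw [if_pos hcond]
      have : entries.find? (fun e => rk (x :: xs) e == 0) =
          entries.find? (fun e => pvGetExt e == some x) := by
        apply find?_congr_mem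
        intro a _
        rw [rk_cons]
        cases pvGetExt a == some x <;> simp
      rw [this, hf]
    | none =>
      have hall : ∀ e ∈ entries, (pvGetExt e == some x) = false :=
        fun e he => by simpa using List.find?_eq_none.mp hf e he
      have hrk : ∀ e ∈ entries, rk (x :: xs) e = rk xs e + 1 := by
        intro e he; rw [rk_cons, hall e he]; simp
      have hmn : mnC (x :: xs) (x :: xs).length entries = mnC xs xs.length entries + 1 := by
        clear ih hf
        induction entries with
        | nil => simp [mnC]
        | cons a es ihe =>
          have h1 := hrk a (List.mem_cons_self ..)
          have h2 := ihe (fun e he => hall e (List.mem_cons_of_mem _ he))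
            (fun e he => hrk e (List.mem_cons_of_mem _ he))
          simp only [mnC, List.foldr_cons] at *
          omega
      rw [hmn]
      have hlen : (x :: xs).length = xs.length + 1 := rfl
      rw [hlen]
      by_cases hc : mnC xs xs.length entries < xs.length
      · rw [if_pos (by omega)]
        rw [ih, if_pos hc]
        apply find?_congr_mem
        intro a ha
        rw [hrk a ha]
        simp
      · rw [if_neg (by omega), ih, if_neg hc]

-- B's fold characterized: state (b0, r0) is replaced iff some entry beats r0
theorem Bfold (es : List (List (String × String))) :
    ∀ (b0 : Option (List (String × String))) (r0 : Nat),
      es.foldl (fun st e => let r := pvRank e; if r < st.2 then (some e, r) else st) (b0, r0) =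
        if mnC pvPreferred r0 es < r0 then
          (es.find? (fun e => rk pvPreferred e == mnC pvPreferred r0 es), mnC pvPreferred r0 es)
        else (b0, r0) := by
  induction es with
  | nil => intro b0 r0; simp [mnC]
  | cons e es ih =>
    intro b0 r0
    have hmc : mnC pvPreferred r0 (e :: es) = min (rk pvPreferred e) (mnC pvPreferred r0 es) := by
      simp [mnC]
    rw [List.foldl_cons]
    by_cases h : pvRank e < r0
    · simp only [h, if_pos]
      rw [ih (some e) (pvRank e)]
      have hre : rk pvPreferred e = pvRank e := rk_eq_pvRank e
      have hsplit : mnC pvPreferred (pvRank e) es = min (pvRank e) (mnC pvPreferred r0 es) := by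
        have h1 : min (pvRank e) r0 = pvRank e := by omega
        have h2 := mnC_init_min pvPreferred (pvRank e) r0 es
        rw [h1] at h2
        exact h2
      have hm : mnC pvPreferred r0 (e :: es) = mnC pvPreferred (pvRank e) es := by
        rw [hmc, hre, hsplit]
      have hle : mnC pvPreferred (pvRank e) es ≤ pvRank e := mnC_le_init _ _ _
      by_cases h2 : mnC pvPreferred (pvRank e) es < pvRank e
      · rw [if_pos h2, hm, if_pos (by omega)]
        have : (rk pvPreferred e == mnC pvPreferred (pvRank e) es) = false := by
          rw [hre]; simp; omega
        rw [List.find?_cons, this]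
      · have heq : mnC pvPreferred (pvRank e) es = pvRank e := by omega
        rw [if_neg h2, hm, heq, if_pos h]
        have : (rk pvPreferred e == pvRank e) = true := by rw [hre]; simp
        rw [List.find?_cons, this]
    · simp only [if_neg h]
      rw [ih b0 r0]
      have hre : rk pvPreferred e = pvRank e := rk_eq_pvRank e
      have hles : mnC pvPreferred r0 es ≤ r0 := mnC_le_init _ _ _
      have hm : mnC pvPreferred r0 (e :: es) = mnC pvPreferred r0 es := by
        rw [hmc, hre]; omega
      rw [hm]
      by_cases hc : mnC pvPreferred r0 es < r0
      · rw [if_pos hc, if_pos hc]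
        have : (rk pvPreferred e == mnC pvPreferred r0 es) = false := by
          rw [hre]; simp; omega
        rw [List.find?_cons, this]
      · rw [if_neg hc, if_neg hc]

-- capped minima with init 6 and init 5 agree on nonempty lists (ranks are ≤ 5)
theorem mnC_six_five (e : List (String × String)) (es : List (List (String × String))) :
    mnC pvPreferred 6 (e :: es) = mnC pvPreferred 5 (e :: es) := by
  induction es generalizing e with
  | nil =>
    have h := rk_le pvPreferred e
    rw [show pvPreferred.length = 5 from rfl] at h
    simp only [mnC, List.foldr_cons, List.foldr_nil]
    omega
  | cons a es ih =>
    have h1 := ih a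
    simp only [mnC, List.foldr_cons] at *
    omega

-- ===== VERDICT (by name: the statement is the Claim_ definition above) =====
theorem pick_format_py_spec : Claim_equal_pick_format_py := by
  intro entries _
  unfold Spec_pick_format_py pick_format_py pick_format_py_alt
  cases entries with
  | nil => simp
  | cons e es =>
    have hne : (e :: es) ≠ ([] : List (List (String × String))) := by simp
    rw [if_neg hne, Fchar]
    have hlen : pvPreferred.length = 5 := rfl
    have hplus : pvPreferred.length + 1 = 6 := rfl
    rw [Bfold, hplus, mnC_six_five]
    have h5 : mnC pvPreferred 5 (e :: es) ≤ 5 := mnC_le_init _ _ _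
    rw [hlen]
    by_cases hc : mnC pvPreferred 5 (e :: es) < 5
    · rw [if_pos hc, if_pos (by omega)]
      cases hf : (e :: es).find? (fun a => rk pvPreferred a == mnC pvPreferred 5 (e :: es)) with
      | some b => rfl
      | none =>
        exfalso
        obtain ⟨b, hb, hrb⟩ := mnC_attained pvPreferred 5 (e :: es) hc
        have := List.find?_eq_none.mp hf b hb
        simp [hrb] at this
    · have heq : mnC pvPreferred 5 (e :: es) = 5 := by omega
      rw [if_neg hc, if_pos (by omega)]
      have hre : rk pvPreferred e = 5 := by
        have h1 := mnC_le_of_mem pvPreferred 5 (List.mem_cons_self (a := e) (l := es))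
        have h2 := rk_le pvPreferred e
        rw [show pvPreferred.length = 5 from rfl] at h2
        omega
      have hfind : ((e :: es).find? (fun a => rk pvPreferred a == mnC pvPreferred 5 (e :: es))) = some e := by
        rw [List.find?_cons]
        have hb : (rk pvPreferred e == mnC pvPreferred 5 (e :: es)) = true := by
          rw [hre, heq]; rfl
        rw [hb]
      rw [hfind]
      simp [PySem.List.pyGet?, PySem.List.pyIdx?]
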